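-- pv_equiv track=rewrite | github.com/953250587/leetcode-python | LoudAndRich_MID_851.py | loudAndRich_1
-- ===== SOURCE A (Python) =====
-- def loudAndRich_1(richer, quiet):
--     """
--     250ms
--     :param richer:
--     :param quiet:
--     :return:
--     """
--     import collections
--     edges, memo, res = collections.defaultdict(list), {}, [i for i in range(len(quiet))]
--     for r, p in richer: edges[p].append(r)
--
--     def explore(i):
--         if i in memo: return memo[i]
--         cur_min = i
--         for v in edges[i]:
--             cur = explore(v)
--             if quiet[cur] < quiet[cur_min]: cur_min = cur
--         res[i] = memo[i] = cur_min
--         return cur_min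
--
--     for i in range(len(quiet)): explore(i)
--     return res
-- ===== SOURCE B (Python) =====
-- def loudAndRich_1(richer, quiet):
--     """Iterative synchronous relaxation: rebuild the whole answer vector from the
--     successor table each round until it stops changing (at most n rounds)."""
--     n = len(quiet)
--     succ = {}
--     for r, p in richer:
--         succ.setdefault(p, []).append(r)
--     res = list(range(n))
--     for _ in range(n):
--         new = []
--         for i in range(n):
--             cur_min = i
--             for v in succ.get(i, []):
--                 cur = res[v]
--                 if quiet[cur] < quiet[cur_min]:
--                     cur_min = cur
--             new.append(cur_min)
--         if new == res:
--             break
--         res = new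
--     return res
-- ===== Notes on version B (the rewrite author's own statement) =====
-- stated objective: alternative
-- what changed: Replaced A's memoized recursive DFS (defaultdict adjacency + dict memo + recursion) by an iterative synchronous relaxation: build a successor dict, then rebuild the whole answer vector from the previous one round by round until it stops changing (at most n rounds).
-- outside the precondition, e.g. on loudAndRich_1([[-1, 0]], [3, 1]): A returns [-1, 1], B returns [1, 1]; on loudAndRich_1([[0, 1], [1, 0]], [0, 0]): A raises RecursionError, B returns [0, 1]
import Mathlib
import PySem

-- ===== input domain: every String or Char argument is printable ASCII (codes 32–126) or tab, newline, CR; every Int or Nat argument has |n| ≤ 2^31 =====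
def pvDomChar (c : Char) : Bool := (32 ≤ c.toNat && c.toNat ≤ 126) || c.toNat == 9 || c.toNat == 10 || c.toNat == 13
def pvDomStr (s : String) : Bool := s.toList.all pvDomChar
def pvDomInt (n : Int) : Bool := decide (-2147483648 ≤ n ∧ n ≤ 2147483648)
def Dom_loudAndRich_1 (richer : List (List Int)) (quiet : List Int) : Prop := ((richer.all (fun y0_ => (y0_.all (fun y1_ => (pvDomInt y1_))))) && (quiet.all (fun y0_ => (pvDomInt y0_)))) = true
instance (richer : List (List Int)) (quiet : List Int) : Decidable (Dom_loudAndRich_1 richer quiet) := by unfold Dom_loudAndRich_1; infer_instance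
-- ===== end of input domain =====

-- B replaces A's memoized recursive DFS by iterative relaxation rounds over a successor
-- table until the answer vector is stable (objective: alternative; equal return values on Pre_).

-- ===== PORT A =====
-- quiet[j] (total form; Pre_ keeps every index A actually reads in range)
def pvQ (quiet : List Int) (j : Int) : Int := (PySem.List.pyGet? quiet j).getD 0

-- `edges = defaultdict(list); for r, p in richer: edges[p].append(r)`
-- (rows that are not 2-element lists make Python raise ValueError; excluded by Pre_)
def pvBuildEdgesA (richer : List (List Int)) : PySem.Dict Int (List Int) :=
  richer.foldl (fun d pr =>
    match pr with
    | [r, p] => d.insert p (d.getD p [] ++ [r])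
    | _ => d) PySem.Dict.empty

-- `explore(i)` with the memo dict and the res list threaded; fuel makes the recursion
-- total (fuel = n suffices on Pre_'s acyclic graphs; the 0 case is unreachable there)
def pvExploreA (quiet : List Int) (edges : PySem.Dict Int (List Int)) :
    Nat → Int → PySem.Dict Int Int → List Int → Int × PySem.Dict Int Int × List Int
  | 0, i, memo, res => (i, memo, res)
  | fuel+1, i, memo, res =>
    match memo.get? i with
    | some m => (m, memo, res)
    | none =>
      let st := (edges.getD i []).foldl
        (fun st v =>
          let r := pvExploreA quiet edges fuel v st.2.1 st.2.2
          ((if pvQ quiet r.1 < pvQ quiet st.1 then r.1 else st.1), r.2.1, r.2.2))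
        (i, memo, res)
      (st.1, st.2.1.insert i st.1, st.2.2.set i.toNat st.1)

def loudAndRich_1 (richer : List (List Int)) (quiet : List Int) : List Int :=
  let n := quiet.length
  let edges := pvBuildEdgesA richer
  let res0 := PySem.List.pyRange 0 (n : Int) 1
  let fin := (PySem.List.pyRange 0 (n : Int) 1).foldl
      (fun (st : PySem.Dict Int Int × List Int) i =>
        (pvExploreA quiet edges n i st.1 st.2).2)
      (PySem.Dict.empty, res0)
  fin.2

-- ===== PORT B =====
-- `succ = {}; for r, p in richer: succ.setdefault(p, []).append(r)`
def pvBuildSuccB (richer : List (List Int)) : PySem.Dict Int (List Int) :=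
  richer.foldl (fun d pr =>
    match pr with
    | [r, p] => d.insert p (d.getD p [] ++ [r])
    | _ => d) PySem.Dict.empty

-- one relaxation round: new answer vector from the previous one
def pvStepB (quiet : List Int) (succ : PySem.Dict Int (List Int)) (res : List Int) : List Int :=
  (PySem.List.pyRange 0 (quiet.length : Int) 1).map (fun i =>
    (succ.getD i []).foldl
      (fun cm v =>
        if pvQ quiet ((PySem.List.pyGet? res v).getD 0) < pvQ quiet cm
        then (PySem.List.pyGet? res v).getD 0 else cm) i)

-- `for _ in range(n): new = …; if new == res: break; res = new`
def pvLoopB (quiet : List Int) (succ : PySem.Dict Int (List Int)) : Nat → List Int → List Int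
  | 0, res => res
  | k+1, res =>
    let new := pvStepB quiet succ res
    if new = res then res else pvLoopB quiet succ k new

def loudAndRich_1_alt (richer : List (List Int)) (quiet : List Int) : List Int :=
  let n := quiet.length
  let succ := pvBuildSuccB richer
  pvLoopB quiet succ n (PySem.List.pyRange 0 (n : Int) 1)

-- ===== PRECONDITION & SPEC =====
-- canonical successor list of node i: the r of every pair [r, p] of richer with p = i, in order
def pvSucc (richer : List (List Int)) (i : Int) : List Int :=
  richer.foldl (fun acc pr =>
    match pr with
    | [r, p] => if p = i then acc ++ [r] else acc
    | _ => acc) []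

-- Closed-form acyclicity data for Pre_: the k-step successor frontier of node i, a property of
-- the input `richer` alone (it never runs either port's computation, which is about `quiet`-minima)
def pvReach (richer : List (List Int)) : Nat → Int → List Int
  | 0, i => [i]
  | k+1, i => ((pvReach richer k i).flatMap (pvSucc richer)).dedup

-- Pre_ excludes richer rows that are not 2-element lists (A raises ValueError), rows whose
-- second entry p is a valid node 0..n-1 but whose first entry r is not (A then raises
-- IndexError, or for -n ≤ r < 0 returns a value produced by Python's accidental negative-index
-- wraparound), and inputs whose valid-node edges form a cycle (A raises RecursionError).
def Pre_loudAndRich_1 (richer : List (List Int)) (quiet : List Int) : Prop :=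
  (∀ pr ∈ richer, pr.length = 2 ∧
    (0 ≤ pr.getD 1 0 → pr.getD 1 0 < (quiet.length : Int) →
      (0 ≤ pr.getD 0 0 ∧ pr.getD 0 0 < (quiet.length : Int)))) ∧
  (∀ j ∈ List.range quiet.length, ∀ k ∈ List.range quiet.length,
    ((j : Int) ∉ pvReach richer (k+1) (j : Int)))
instance (richer : List (List Int)) (quiet : List Int) : Decidable (Pre_loudAndRich_1 richer quiet) := by
  unfold Pre_loudAndRich_1; infer_instance

def pvWitness_loudAndRich_1 : List (List Int) × List Int := ([[1, 0]], [0, 5])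

def Spec_loudAndRich_1 (richer : List (List Int)) (quiet : List Int) (out : List Int) : Prop := out = loudAndRich_1_alt richer quiet
instance (richer : List (List Int)) (quiet : List Int) (out : List Int) : Decidable (Spec_loudAndRich_1 richer quiet out) := by unfold Spec_loudAndRich_1; infer_instance

-- ===== CLAIM (what is proved, stated in full; the proofs are below) =====
def Claim_equal_loudAndRich_1 : Prop := ∀ (richer : List (List Int)) (quiet : List Int), Dom_loudAndRich_1 richer quiet → Pre_loudAndRich_1 richer quiet → Spec_loudAndRich_1 richer quiet (loudAndRich_1 richer quiet)

-- ===== LEMMAS AND PROOFS =====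

-- the shared recurrence: value after k relaxation rounds / at recursion depth k
def pvF (richer : List (List Int)) (quiet : List Int) : Nat → Int → Int
  | 0, i => i
  | k+1, i => (pvSucc richer i).foldl
      (fun cm v =>
        if pvQ quiet (pvF richer quiet k v) < pvQ quiet cm then pvF richer quiet k v else cm) i

-- successor chains of the richer graph
def pvChain (richer : List (List Int)) : Int → List Int → Prop
  | _, [] => True
  | i, v :: l => v ∈ pvSucc richer i ∧ pvChain richer v l

-- "every successor chain starting at i has length < k"
def pvP (richer : List (List Int)) (k : Nat) (i : Int) : Prop :=
  ∀ l, pvChain richer i l → l.length < k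

-- abbreviations used throughout
def pvValid (richer : List (List Int)) (n : Nat) : Prop :=
  ∀ pr ∈ richer, pr.length = 2 ∧
    (0 ≤ pr.getD 1 0 → pr.getD 1 0 < (n : Int) →
      (0 ≤ pr.getD 0 0 ∧ pr.getD 0 0 < (n : Int)))

lemma pvSucc_mem_aux {i y : Int} : ∀ (l : List (List Int)) (acc : List Int),
    y ∈ l.foldl (fun acc pr =>
      match pr with
      | [r, p] => if p = i then acc ++ [r] else acc
      | _ => acc) acc →
    y ∈ acc ∨ [y, i] ∈ l := by
  intro l
  induction l with
  | nil => intro acc h; exact Or.inl h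
  | cons pr t ih =>
    intro acc h
    simp only [List.foldl_cons] at h
    rcases pr with _ | ⟨r, _ | ⟨p, _ | ⟨x, rest⟩⟩⟩
    · rcases ih _ h with h' | h'
      · exact Or.inl h'
      · exact Or.inr (List.mem_cons_of_mem _ h')
    · rcases ih _ h with h' | h'
      · exact Or.inl h'
      · exact Or.inr (List.mem_cons_of_mem _ h')
    · by_cases hp : p = i
      · subst hp
        simp only [] at h
        rcases ih _ h with h' | h'
        · rcases List.mem_append.mp h' with h'' | h''
          · exact Or.inl h''
          · simp only [List.mem_singleton] at h''
            subst h''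
            exact Or.inr (List.mem_cons_self)
        · exact Or.inr (List.mem_cons_of_mem _ h')
      · simp only [if_neg hp] at h
        rcases ih _ h with h' | h'
        · exact Or.inl h'
        · exact Or.inr (List.mem_cons_of_mem _ h')
    · rcases ih _ h with h' | h'
      · exact Or.inl h'
      · exact Or.inr (List.mem_cons_of_mem _ h')

lemma pvSucc_mem {richer : List (List Int)} {i v : Int}
    (h : v ∈ pvSucc richer i) : [v, i] ∈ richer := by
  rcases pvSucc_mem_aux richer [] h with h' | h'
  · simp at h'
  · exact h'

lemma pvSucc_range {richer : List (List Int)} {n : Nat} (hv : pvValid richer n)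
    {i v : Int} (hi0 : 0 ≤ i) (hin : i < (n : Int)) (h : v ∈ pvSucc richer i) :
    0 ≤ v ∧ v < (n : Int) := by
  have h2 := (hv _ (pvSucc_mem h)).2
  simp only [List.getD] at h2
  simpa using h2 (by simpa using hi0) (by simpa using hin)

lemma mem_pvReach_succ {richer : List (List Int)} {x y : Int} {k : Nat} :
    y ∈ pvReach richer (k+1) x ↔ ∃ w ∈ pvReach richer k x, y ∈ pvSucc richer w := by
  have h : pvReach richer (k+1) x = ((pvReach richer k x).flatMap (pvSucc richer)).dedup := rfl
  rw [h, List.mem_dedup, List.mem_flatMap]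

lemma pvReach_front {richer : List (List Int)} {x v : Int} {k : Nat}
    (hv : v ∈ pvSucc richer x) : ∀ {y : Int}, y ∈ pvReach richer k v →
    y ∈ pvReach richer (k+1) x := by
  induction k with
  | zero =>
    intro y hy
    simp only [pvReach, List.mem_singleton] at hy
    subst hy
    exact mem_pvReach_succ.mpr ⟨x, by simp [pvReach], hv⟩
  | succ k ih =>
    intro y hy
    obtain ⟨w, hw, hyw⟩ := mem_pvReach_succ.mp hy
    exact mem_pvReach_succ.mpr ⟨w, ih hw, hyw⟩

lemma pvChain_get_reach {richer : List (List Int)} :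
    ∀ {l : List Int} {i : Int}, pvChain richer i l → ∀ (m : Nat) (hm : m < (i :: l).length),
    (i :: l)[m]'hm ∈ pvReach richer m i := by
  intro l
  induction l with
  | nil =>
    intro i _ m hm
    simp only [List.length_cons, List.length_nil] at hm
    interval_cases m
    simp [pvReach]
  | cons v l' ih =>
    intro i h m hm
    obtain ⟨hv, hch⟩ := h
    match m with
    | 0 => simp [pvReach]
    | m'+1 =>
      have : (i :: v :: l')[m'+1]'hm = (v :: l')[m']'(by simpa using hm) := by simp
      rw [this]
      exact pvReach_front hv (ih hch m' _)

lemma pvChain_drop {richer : List (List Int)} :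
    ∀ (a : Nat) {l : List Int} {i : Int}, pvChain richer i l → ∀ (ha : a < (i :: l).length),
    pvChain richer ((i :: l)[a]'ha) (l.drop a) := by
  intro a
  induction a with
  | zero => intro l i h _; simpa using h
  | succ a ih =>
    intro l i h ha
    match l with
    | [] => simp at ha
    | v :: l' =>
      obtain ⟨hv, hch⟩ := h
      have : (i :: v :: l')[a+1]'ha = (v :: l')[a]'(by simpa using ha) := by simp
      rw [this]
      exact ih hch _

lemma pvChain_take {richer : List (List Int)} :
    ∀ {l : List Int} {i : Int}, pvChain richer i l → ∀ (m : Nat),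
    pvChain richer i (l.take m) := by
  intro l
  induction l with
  | nil => intro i h m; simpa using h
  | cons v l' ih =>
    intro i h m
    obtain ⟨hv, hch⟩ := h
    match m with
    | 0 => simp [pvChain]
    | m'+1 => exact ⟨hv, ih hch m'⟩

lemma pvChain_mem_range {richer : List (List Int)} {n : Nat} (hv : pvValid richer n) :
    ∀ {l : List Int} {i : Int}, 0 ≤ i → i < (n : Int) → pvChain richer i l →
    ∀ {x : Int}, x ∈ l → 0 ≤ x ∧ x < (n : Int) := by
  intro l
  induction l with
  | nil => intro i _ _ _ x hx; simp at hx
  | cons v l' ih =>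
    intro i hi0 hin h x hx
    obtain ⟨hvs, hch⟩ := h
    have hvb := pvSucc_range hv hi0 hin hvs
    rcases List.mem_cons.mp hx with rfl | hx'
    · exact hvb
    · exact ih hvb.1 hvb.2 hch hx'

lemma pvP_zero {richer : List (List Int)} {i : Int} : ¬ pvP richer 0 i := by
  intro h
  have := h [] trivial
  omega

lemma pvP_succ {richer : List (List Int)} {k : Nat} {i v : Int}
    (h : pvP richer (k+1) i) (hv : v ∈ pvSucc richer i) : pvP richer k v := by
  intro l hch
  have := h (v :: l) ⟨hv, hch⟩
  simp only [List.length_cons] at this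
  omega

-- the pigeonhole step: on an acyclic valid graph with n nodes, chains are shorter than n
lemma pvP_all {richer : List (List Int)} {quiet : List Int}
    (hpre : Pre_loudAndRich_1 richer quiet) :
    ∀ i : Int, 0 ≤ i → i < (quiet.length : Int) → pvP richer quiet.length i := by
  obtain ⟨hv, hc⟩ := hpre
  set n := quiet.length with hn
  intro i hi0 hin l hch
  by_contra hlen
  rw [Nat.not_lt] at hlen
  have hch' : pvChain richer i (l.take n) := pvChain_take hch n
  have hlen' : (l.take n).length = n := by simp [List.length_take]; omega
  set l' := l.take n with hl'
  have hlc : (i :: l').length = n + 1 := by simp [hlen']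
  -- the n+1 vertices all lie in [0, n)
  have hmem : ∀ (m : Nat), m < n + 1 → (i :: l').getD m 0 ∈ Finset.Ico (0 : Int) (n : Int) := by
    intro m hm
    rw [List.getD_eq_getElem _ _ (by omega)]
    match m with
    | 0 => simpa using ⟨hi0, hin⟩
    | m'+1 =>
      have hx : (i :: l')[m'+1]'(by omega) ∈ l' := by
        have h1 : (i :: l')[m'+1]'(by omega) = l'[m']'(by simp at hlc ⊢; omega) := by simp
        rw [h1]; exact List.getElem_mem _
      have := pvChain_mem_range hv hi0 hin hch' hx
      simpa using this
  -- pigeonhole: two positions with the same vertex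
  have hcard : (Finset.Ico (0 : Int) (n : Int)).card < (Finset.univ : Finset (Fin (n+1))).card := by
    simp [Int.card_Ico]
  obtain ⟨a, _, b, _, hab, heq⟩ :=
    Finset.exists_ne_map_eq_of_card_lt_of_maps_to (f := fun (m : Fin (n+1)) => (i :: l').getD m.val 0)
      hcard (fun (m : Fin (n+1)) _ => hmem m.val m.isLt)
  -- reduce to ordered positions A < B with equal vertices, and derive the cycle
  have key : ∀ (A d : Nat), A + d + 1 < n + 1 →
      (i :: l').getD A 0 = (i :: l').getD (A + d + 1) 0 → False := by
    intro A d hB hEq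
    have hA : A < (i :: l').length := by omega
    set vtx := (i :: l')[A]'hA with hvtx
    have h1 : pvChain richer vtx (l'.drop A) := pvChain_drop A hch' hA
    have hdl : (l'.drop A).length = n - A := by simp [hlen']
    have hm : d + 1 < (vtx :: l'.drop A).length := by simp [hdl]; omega
    have h2 := pvChain_get_reach h1 (d+1) hm
    have hAd : A + d < l'.length := by omega
    have hsame : (vtx :: l'.drop A)[d+1]'hm = vtx := by
      have e1 : (vtx :: l'.drop A)[d+1]'hm = (l'.drop A)[d]'(by omega) := by simp
      have e2 : (l'.drop A)[d]'(by simp [hdl]; omega) = l'[A + d]'hAd := by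
        simp
      have e3 : (i :: l')[A + d + 1]'(by omega) = l'[A + d]'hAd := by simp
      rw [e1, e2, ← e3]
      rw [List.getD_eq_getElem _ _ (by omega), List.getD_eq_getElem _ _ (by omega)] at hEq
      rw [← hEq]
    rw [hsame] at h2
    -- vtx ∈ pvReach (d+1) vtx contradicts acyclicity
    have hvr : vtx ∈ Finset.Ico (0 : Int) (n : Int) := by
      have := hmem A (by omega)
      rwa [List.getD_eq_getElem _ _ (by omega)] at this
    simp only [Finset.mem_Ico] at hvr
    have hj : vtx.toNat ∈ List.range n := by
      rw [List.mem_range]; omega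
    have hd : d ∈ List.range n := by rw [List.mem_range]; omega
    have := hc vtx.toNat hj d hd
    rw [Int.toNat_of_nonneg hvr.1] at this
    exact this h2
  rcases Nat.lt_or_ge a.val b.val with h' | h'
  · exact key a.val (b.val - a.val - 1) (by omega)
      (by rw [show a.val + (b.val - a.val - 1) + 1 = b.val by omega]; exact heq)
  · have h'' : b.val < a.val := by
      rcases Nat.lt_or_ge b.val a.val with h2 | h2
      · exact h2
      · exact absurd (Fin.ext (by omega)) hab
    exact key b.val (a.val - b.val - 1) (by omega)
      (by rw [show b.val + (a.val - b.val - 1) + 1 = a.val by omega]; exact heq.symm)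

lemma pvF_stab_one {richer : List (List Int)} {quiet : List Int} :
    ∀ {k : Nat} {i : Int}, pvP richer k i →
      pvF richer quiet (k+1) i = pvF richer quiet k i := by
  intro k
  induction k with
  | zero => intro i h; exact absurd h pvP_zero
  | succ k ih =>
    intro i h
    show (pvSucc richer i).foldl _ i = (pvSucc richer i).foldl _ i
    apply PySem.List.foldl_congr_mem
    intro cm v hvmem
    rw [ih (pvP_succ h hvmem)]

-- ===== B-side: the port of B computes the pvF vector =====

-- the answer vector after k rounds
def pvVec (richer : List (List Int)) (quiet : List Int) (k : Nat) : List Int :=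
  (List.range quiet.length).map (fun j : Nat => pvF richer quiet k (j : Int))

lemma pvBuildDict_aux (i : Int) : ∀ (l : List (List Int)) (d : PySem.Dict Int (List Int)),
    (l.foldl (fun d pr =>
      match pr with
      | [r, p] => d.insert p (d.getD p [] ++ [r])
      | _ => d) d).getD i [] =
    l.foldl (fun acc pr =>
      match pr with
      | [r, p] => if p = i then acc ++ [r] else acc
      | _ => acc) (d.getD i []) := by
  intro l
  induction l with
  | nil => intro d; rfl
  | cons pr t ih =>
    intro d
    simp only [List.foldl_cons]
    rcases pr with _ | ⟨r, _ | ⟨p, _ | ⟨x, rest⟩⟩⟩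
    · exact ih d
    · exact ih d
    · have e1 : (match ([r, p] : List Int) with
          | [r, p] => d.insert p (d.getD p [] ++ [r])
          | _ => d) = d.insert p (d.getD p [] ++ [r]) := rfl
      have e2 : (match ([r, p] : List Int) with
          | [r, p] => if p = i then d.getD i [] ++ [r] else d.getD i []
          | _ => d.getD i []) = if p = i then d.getD i [] ++ [r] else d.getD i [] := rfl
      rw [e1, ih (d.insert p (d.getD p [] ++ [r])), e2]
      congr 1
      by_cases hpi : p = i
      · subst hpi
        rw [if_pos rfl, PySem.Dict.getD_insert_self]
      · rw [if_neg hpi, PySem.Dict.getD_insert_of_ne d _ _ (fun h => hpi h.symm)]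
    · exact ih d

lemma pvBuildSuccB_getD (richer : List (List Int)) (i : Int) :
    (pvBuildSuccB richer).getD i [] = pvSucc richer i := by
  unfold pvBuildSuccB pvSucc
  rw [pvBuildDict_aux i richer PySem.Dict.empty]
  congr 1

lemma pvVec_getElem {richer : List (List Int)} {quiet : List Int} {k : Nat} {j : Nat}
    (hj : j < quiet.length) :
    (PySem.List.pyGet? (pvVec richer quiet k) (j : Int)).getD 0 = pvF richer quiet k (j : Int) := by
  rw [PySem.List.pyGet?_natCast]
  unfold pvVec
  rw [List.getElem?_map, List.getElem?_range hj]
  rfl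

lemma pvStepB_vec {richer : List (List Int)} {quiet : List Int}
    (hv : pvValid richer quiet.length) (k : Nat) :
    pvStepB quiet (pvBuildSuccB richer) (pvVec richer quiet k) =
      pvVec richer quiet (k+1) := by
  unfold pvStepB
  rw [PySem.List.pyRange_zero_nat, List.map_map]
  unfold pvVec
  apply List.map_congr_left
  intro j hj
  rw [List.mem_range] at hj
  show ((pvBuildSuccB richer).getD (j : Int) []).foldl _ _ =
    pvF richer quiet (k+1) (j : Int)
  rw [pvBuildSuccB_getD richer (j : Int)]
  have hF : pvF richer quiet (k+1) (j : Int) = (pvSucc richer (j : Int)).foldl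
      (fun cm v => if pvQ quiet (pvF richer quiet k v) < pvQ quiet cm then pvF richer quiet k v else cm)
      (j : Int) := rfl
  rw [hF]
  apply PySem.List.foldl_congr_mem
  intro cm v hvmem
  have hvr := pvSucc_range hv (by omega : (0:Int) ≤ (j : Int)) (by exact_mod_cast hj) hvmem
  have hcur : (PySem.List.pyGet? (pvVec richer quiet k) v).getD 0 = pvF richer quiet k v := by
    have hvv : v = ((v.toNat : Nat) : Int) := by omega
    rw [hvv, pvVec_getElem (by omega)]
  unfold pvVec at hcur
  rw [hcur]

lemma pvVec_stab {richer : List (List Int)} {quiet : List Int}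
    (hv : pvValid richer quiet.length) {k : Nat}
    (h : ∀ x : Int, 0 ≤ x → x < (quiet.length : Int) →
      pvF richer quiet (k+1) x = pvF richer quiet k x) :
    ∀ d, ∀ x : Int, 0 ≤ x → x < (quiet.length : Int) →
      pvF richer quiet (k+d) x = pvF richer quiet k x := by
  intro d
  induction d with
  | zero => intro x _ _; rfl
  | succ d ih =>
    intro x hx0 hxn
    have h1 : pvF richer quiet (k+(d+1)) x = (pvSucc richer x).foldl
        (fun cm v => if pvQ quiet (pvF richer quiet (k+d) v) < pvQ quiet cm then pvF richer quiet (k+d) v else cm) x := rfl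
    have h2 : pvF richer quiet (k+1) x = (pvSucc richer x).foldl
        (fun cm v => if pvQ quiet (pvF richer quiet k v) < pvQ quiet cm then pvF richer quiet k v else cm) x := rfl
    rw [h1, ← h x hx0 hxn, h2]
    apply PySem.List.foldl_congr_mem
    intro cm v hvmem
    have hvr := pvSucc_range hv hx0 hxn hvmem
    rw [ih v hvr.1 hvr.2]

lemma pvVec_eq_iff {richer : List (List Int)} {quiet : List Int} {k k' : Nat}
    (h : pvVec richer quiet k = pvVec richer quiet k') :
    ∀ x : Int, 0 ≤ x → x < (quiet.length : Int) →
      pvF richer quiet k x = pvF richer quiet k' x := by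
  intro x hx0 hxn
  have hj : x.toNat < quiet.length := by omega
  have := congrArg (fun l => l[x.toNat]?) h
  simp only [pvVec, List.getElem?_map, List.getElem?_range hj, Option.map_some] at this
  rw [show ((x.toNat : Nat) : Int) = x from by omega] at this
  exact Option.some.inj this

lemma pvLoopB_vec {richer : List (List Int)} {quiet : List Int}
    (hv : pvValid richer quiet.length) :
    ∀ (m k : Nat), k + m = quiet.length →
    pvLoopB quiet (pvBuildSuccB richer) m (pvVec richer quiet k) =
      pvVec richer quiet quiet.length := by
  intro m
  induction m with
  | zero => intro k hk; simp only [pvLoopB]; rw [show k = quiet.length from by omega]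
  | succ m ih =>
    intro k hk
    show (if pvStepB quiet (pvBuildSuccB richer) (pvVec richer quiet k) = pvVec richer quiet k
          then pvVec richer quiet k
          else pvLoopB quiet (pvBuildSuccB richer) m
            (pvStepB quiet (pvBuildSuccB richer) (pvVec richer quiet k))) =
        pvVec richer quiet quiet.length
    rw [pvStepB_vec hv k]
    split_ifs with hstable
    · -- stable: the vector no longer changes, so it already equals round n
      have hpt := pvVec_eq_iff hstable
      have hall := pvVec_stab hv hpt (quiet.length - k)
      unfold pvVec
      apply List.map_congr_left
      intro j hj
      rw [List.mem_range] at hj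
      have := hall (j : Int) (by omega) (by omega)
      rw [show k + (quiet.length - k) = quiet.length from by omega] at this
      exact this.symm
    · exact ih (k+1) (by omega)

lemma loudAndRich_1_alt_eq {richer : List (List Int)} {quiet : List Int}
    (hv : pvValid richer quiet.length) :
    loudAndRich_1_alt richer quiet = pvVec richer quiet quiet.length := by
  have h0 : PySem.List.pyRange 0 (quiet.length : Int) 1 = pvVec richer quiet 0 := by
    rw [PySem.List.pyRange_zero_nat]
    rfl
  show pvLoopB quiet (pvBuildSuccB richer) quiet.length
      (PySem.List.pyRange 0 (quiet.length : Int) 1) = _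
  rw [h0]
  exact pvLoopB_vec hv quiet.length 0 (by omega)

-- ===== A-side: the port of A computes the same pvF vector =====

lemma pvBuildEdgesA_getD (richer : List (List Int)) (i : Int) :
    (pvBuildEdgesA richer).getD i [] = pvSucc richer i := by
  unfold pvBuildEdgesA pvSucc
  rw [pvBuildDict_aux i richer PySem.Dict.empty]
  congr 1

-- the invariant carried by A's memo dict and res list
def pvInv (richer : List (List Int)) (quiet : List Int)
    (memo : PySem.Dict Int Int) (res : List Int) : Prop :=
  res.length = quiet.length ∧
  (∀ k m, memo.get? k = some m → m = pvF richer quiet quiet.length k) ∧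
  (∀ j : Nat, j < quiet.length → res[j]? = some ((memo.get? (j : Int)).getD (j : Int)))

lemma pvExploreA_succ (quiet : List Int) (edges : PySem.Dict Int (List Int))
    (fuel : Nat) (i : Int) (memo : PySem.Dict Int Int) (res : List Int) :
    pvExploreA quiet edges (fuel+1) i memo res =
      match memo.get? i with
      | some m => (m, memo, res)
      | none =>
        let st := (edges.getD i []).foldl
          (fun st v =>
            let r := pvExploreA quiet edges fuel v st.2.1 st.2.2
            ((if pvQ quiet r.1 < pvQ quiet st.1 then r.1 else st.1), r.2.1, r.2.2))
          (i, memo, res)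
        (st.1, st.2.1.insert i st.1, st.2.2.set i.toNat st.1) := rfl

lemma pvExploreA_spec {richer : List (List Int)} {quiet : List Int}
    {edges : PySem.Dict Int (List Int)}
    (hv : pvValid richer quiet.length)
    (hE : ∀ x : Int, edges.getD x [] = pvSucc richer x)
    (hall : ∀ x : Int, 0 ≤ x → x < (quiet.length : Int) → pvP richer quiet.length x) :
    ∀ (fuel : Nat) (i : Int) (memo : PySem.Dict Int Int) (res : List Int),
    0 ≤ i → i < (quiet.length : Int) → pvP richer fuel i →
    pvInv richer quiet memo res →
    (pvExploreA quiet edges fuel i memo res).1 = pvF richer quiet quiet.length i ∧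
    pvInv richer quiet (pvExploreA quiet edges fuel i memo res).2.1
      (pvExploreA quiet edges fuel i memo res).2.2 ∧
    (pvExploreA quiet edges fuel i memo res).2.1.get? i =
      some (pvF richer quiet quiet.length i) ∧
    (∀ k w, memo.get? k = some w →
      (pvExploreA quiet edges fuel i memo res).2.1.get? k = some w) := by
  intro fuel
  induction fuel with
  | zero => intro i memo res _ _ hP _; exact absurd hP pvP_zero
  | succ fuel ihf =>
    intro i memo res hi0 hin hP hInv
    rcases hmi : memo.get? i with _ | m
    · -- not memoized: run the fold over the successors
      have inner : ∀ (l : List Int), (∀ v ∈ l, v ∈ pvSucc richer i) →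
          ∀ (cm : Int) (memo₁ : PySem.Dict Int Int) (res₁ : List Int),
          pvInv richer quiet memo₁ res₁ →
          (l.foldl (fun st v =>
              let r := pvExploreA quiet edges fuel v st.2.1 st.2.2
              ((if pvQ quiet r.1 < pvQ quiet st.1 then r.1 else st.1), r.2.1, r.2.2))
            (cm, memo₁, res₁)).1 =
            l.foldl (fun c v =>
              if pvQ quiet (pvF richer quiet quiet.length v) < pvQ quiet c
              then pvF richer quiet quiet.length v else c) cm ∧
          pvInv richer quiet
            (l.foldl (fun st v =>
              let r := pvExploreA quiet edges fuel v st.2.1 st.2.2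
              ((if pvQ quiet r.1 < pvQ quiet st.1 then r.1 else st.1), r.2.1, r.2.2))
            (cm, memo₁, res₁)).2.1
            (l.foldl (fun st v =>
              let r := pvExploreA quiet edges fuel v st.2.1 st.2.2
              ((if pvQ quiet r.1 < pvQ quiet st.1 then r.1 else st.1), r.2.1, r.2.2))
            (cm, memo₁, res₁)).2.2 ∧
          (∀ k w, memo₁.get? k = some w →
            (l.foldl (fun st v =>
              let r := pvExploreA quiet edges fuel v st.2.1 st.2.2
              ((if pvQ quiet r.1 < pvQ quiet st.1 then r.1 else st.1), r.2.1, r.2.2))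
            (cm, memo₁, res₁)).2.1.get? k = some w) := by
        intro l
        induction l with
        | nil => intro _ cm memo₁ res₁ h₁; exact ⟨rfl, h₁, fun k w h => h⟩
        | cons v t iht =>
          intro hsub cm memo₁ res₁ h₁
          have hvmem : v ∈ pvSucc richer i := hsub v List.mem_cons_self
          have hvr := pvSucc_range hv hi0 hin hvmem
          have hPv : pvP richer fuel v := pvP_succ hP hvmem
          obtain ⟨hval, hInv₂, _, hmono₂⟩ := ihf v memo₁ res₁ hvr.1 hvr.2 hPv h₁
          simp only [List.foldl_cons]
          rw [hval]
          obtain ⟨h1, h2, h3⟩ := iht (fun x hx => hsub x (List.mem_cons_of_mem _ hx))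
            (if pvQ quiet (pvF richer quiet quiet.length v) < pvQ quiet cm
             then pvF richer quiet quiet.length v else cm)
            (pvExploreA quiet edges fuel v memo₁ res₁).2.1
            (pvExploreA quiet edges fuel v memo₁ res₁).2.2 hInv₂
          exact ⟨h1, h2, fun k w h => h3 k w (hmono₂ k w h)⟩
      have hiP : pvP richer quiet.length i := hall i hi0 hin
      obtain ⟨hfold, hInv', hmono'⟩ := inner (edges.getD i []) (by rw [hE]; exact fun v h => h)
        i memo res hInv
      set st := ((edges.getD i []).foldl (fun st v =>
          let r := pvExploreA quiet edges fuel v st.2.1 st.2.2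
          ((if pvQ quiet r.1 < pvQ quiet st.1 then r.1 else st.1), r.2.1, r.2.2))
        (i, memo, res)) with hst
      have hFn : (edges.getD i []).foldl (fun c v =>
          if pvQ quiet (pvF richer quiet quiet.length v) < pvQ quiet c
          then pvF richer quiet quiet.length v else c) i = pvF richer quiet quiet.length i := by
        rw [hE]
        have h1 : pvF richer quiet (quiet.length + 1) i = (pvSucc richer i).foldl (fun c v =>
            if pvQ quiet (pvF richer quiet quiet.length v) < pvQ quiet c
            then pvF richer quiet quiet.length v else c) i := rfl
        rw [← h1]
        exact pvF_stab_one hiP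
      have hv1 : st.1 = pvF richer quiet quiet.length i := by rw [hfold]; exact hFn
      have hopen : pvExploreA quiet edges (fuel+1) i memo res =
          (st.1, st.2.1.insert i st.1, st.2.2.set i.toNat st.1) := by
        rw [pvExploreA_succ, hmi]
      rw [hopen]
      obtain ⟨hlen, hmv, hres⟩ := hInv'
      have hInvF : pvInv richer quiet (st.2.1.insert i st.1) (st.2.2.set i.toNat st.1) := by
        unfold pvInv
        refine ⟨?_, ?_, ?_⟩
        · simpa [List.length_set] using hlen
        · intro k m hk
          by_cases hki : k = i
          · subst hki
            rw [PySem.Dict.get?_insert_self] at hk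
            rw [← Option.some.inj hk, hv1]
          · rw [PySem.Dict.get?_insert_of_ne _ _ hki] at hk
            exact hmv k m hk
        · intro j hj
          by_cases hji : (j : Int) = i
          · have hjt : i.toNat = j := by omega
            rw [List.getElem?_set, hjt, if_pos rfl, hji, PySem.Dict.get?_insert_self]
            rw [hlen] at *
            simp [hj]
          · rw [List.getElem?_set]
            have hne : i.toNat ≠ j := by omega
            rw [if_neg hne, PySem.Dict.get?_insert_of_ne _ _ hji]
            exact hres j hj
      have hget : (st.2.1.insert i st.1).get? i = some (pvF richer quiet quiet.length i) := by
        rw [hv1]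
        exact PySem.Dict.get?_insert_self _ _ _
      have hmonoF : ∀ k w, memo.get? k = some w →
          (st.2.1.insert i st.1).get? k = some w := by
        intro k w hk
        by_cases hki : k = i
        · subst hki; rw [hmi] at hk; cases hk
        · rw [PySem.Dict.get?_insert_of_ne _ _ hki]
          exact hmono' k w hk
      exact ⟨hv1, hInvF, hget, hmonoF⟩
    · -- memoized: return the stored value
      have hopen : pvExploreA quiet edges (fuel+1) i memo res = (m, memo, res) := by
        rw [pvExploreA_succ, hmi]
      rw [hopen]
      have hm := hInv.2.1 i m hmi
      exact ⟨hm, hInv, by rw [hmi, hm], fun k w h => h⟩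

lemma loudAndRich_1_eq {richer : List (List Int)} {quiet : List Int}
    (hpre : Pre_loudAndRich_1 richer quiet) :
    loudAndRich_1 richer quiet = pvVec richer quiet quiet.length := by
  have hv : pvValid richer quiet.length := hpre.1
  have hE : ∀ x : Int, (pvBuildEdgesA richer).getD x [] = pvSucc richer x :=
    pvBuildEdgesA_getD richer
  have hall := pvP_all hpre
  have loop : ∀ (l : List Int), (∀ x ∈ l, 0 ≤ x ∧ x < (quiet.length : Int)) →
      ∀ (memo : PySem.Dict Int Int) (res : List Int), pvInv richer quiet memo res →
      pvInv richer quiet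
        (l.foldl (fun (st : PySem.Dict Int Int × List Int) i =>
          (pvExploreA quiet (pvBuildEdgesA richer) quiet.length i st.1 st.2).2) (memo, res)).1
        (l.foldl (fun (st : PySem.Dict Int Int × List Int) i =>
          (pvExploreA quiet (pvBuildEdgesA richer) quiet.length i st.1 st.2).2) (memo, res)).2 ∧
      (∀ k w, memo.get? k = some w →
        (l.foldl (fun (st : PySem.Dict Int Int × List Int) i =>
          (pvExploreA quiet (pvBuildEdgesA richer) quiet.length i st.1 st.2).2) (memo, res)).1.get? k = some w) ∧
      (∀ x ∈ l,
        (l.foldl (fun (st : PySem.Dict Int Int × List Int) i =>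
          (pvExploreA quiet (pvBuildEdgesA richer) quiet.length i st.1 st.2).2) (memo, res)).1.get? x =
          some (pvF richer quiet quiet.length x)) := by
    intro l
    induction l with
    | nil => intro _ memo res h; exact ⟨h, fun k w hk => hk, by simp⟩
    | cons i t iht =>
      intro hb memo res hInv
      have hib := hb i List.mem_cons_self
      obtain ⟨_, hInv₁, hget₁, hmono₁⟩ :=
        pvExploreA_spec hv hE hall quiet.length i memo res hib.1 hib.2
          (hall i hib.1 hib.2) hInv
      simp only [List.foldl_cons]
      obtain ⟨h1, h2, h3⟩ := iht (fun x hx => hb x (List.mem_cons_of_mem _ hx))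
        (pvExploreA quiet (pvBuildEdgesA richer) quiet.length i memo res).2.1
        (pvExploreA quiet (pvBuildEdgesA richer) quiet.length i memo res).2.2 hInv₁
      refine ⟨h1, fun k w hk => h2 k w (hmono₁ k w hk), ?_⟩
      intro x hx
      rcases List.mem_cons.mp hx with rfl | hx'
      · exact h2 x _ hget₁
      · exact h3 x hx'
  have hInv0 : pvInv richer quiet PySem.Dict.empty
      (PySem.List.pyRange 0 (quiet.length : Int) 1) := by
    refine ⟨?_, ?_, ?_⟩
    · rw [PySem.List.pyRange_zero_nat]; simp
    · intro k m hk
      rw [PySem.Dict.get?_empty] at hk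
      cases hk
    · intro j hj
      rw [PySem.Dict.get?_empty, PySem.List.pyRange_zero_nat]
      simp [List.getElem?_map, List.getElem?_range hj]
  obtain ⟨⟨hlen, hmv, hres⟩, _, hdone⟩ := loop (PySem.List.pyRange 0 (quiet.length : Int) 1)
    (fun x hx => by
      have := (PySem.List.mem_pyRange_one).mp hx
      exact ⟨this.1, this.2⟩)
    PySem.Dict.empty (PySem.List.pyRange 0 (quiet.length : Int) 1) hInv0
  show ((PySem.List.pyRange 0 (quiet.length : Int) 1).foldl
      (fun (st : PySem.Dict Int Int × List Int) i =>
        (pvExploreA quiet (pvBuildEdgesA richer) quiet.length i st.1 st.2).2)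
      (PySem.Dict.empty, PySem.List.pyRange 0 (quiet.length : Int) 1)).2 =
    pvVec richer quiet quiet.length
  apply List.ext_getElem?
  intro j
  by_cases hj : j < quiet.length
  · rw [hres j hj]
    have hmem : (j : Int) ∈ PySem.List.pyRange 0 (quiet.length : Int) 1 := by
      rw [PySem.List.mem_pyRange_one]
      constructor <;> omega
    rw [hdone (j : Int) hmem]
    unfold pvVec
    rw [List.getElem?_map, List.getElem?_range hj]
    rfl
  · have h1 : (pvVec richer quiet quiet.length).length = quiet.length := by
      unfold pvVec; simp
    rw [List.getElem?_eq_none (by omega), List.getElem?_eq_none (by rw [h1]; omega)]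

-- ===== VERDICT (by name: the statement is the Claim_ definition above) =====
theorem loudAndRich_1_spec : Claim_equal_loudAndRich_1 := by
  intro richer quiet _ hpre
  unfold Spec_loudAndRich_1
  rw [loudAndRich_1_eq hpre, loudAndRich_1_alt_eq hpre.1]
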